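-- pv_equiv track=rewrite | github.com/bailin1125/Information-crawling-and-reaching-system-for-university-town-lectures | util.py | replace_valid_str
-- ===== SOURCE A (Python) =====
-- error_key=['\\',r'/',r':','*',"?",r'"',r"<",r">",r"|",r".",r"|",r"？",r"?"]
--
-- def replace_valid_str(input):
--     after_list=[]
--     for title in list(input):
--         title=title.strip()
--         for error in error_key:
--             if(error in title):
--                 title=title.replace(error,"")
--         after_list.append(title)
--     return after_list
-- ===== SOURCE B (Python) =====
-- # Single pass per title: membership in a prebuilt frozenset of forbidden
-- # characters replaces A's 13 repeated full-string replace() scans.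
-- forbidden = frozenset('\\/:*?"<>|.？')
--
-- def replace_valid_str(input):
--     return [''.join(ch for ch in title.strip() if ch not in forbidden)
--             for title in input]
-- ===== Notes on version B (the rewrite author's own statement) =====
-- stated objective: simpler
-- what changed: Replaced A's 13 repeated full-string contains+replace scans per title with one prebuilt frozenset of forbidden characters and a single character-filter pass per title.
import Mathlib
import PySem

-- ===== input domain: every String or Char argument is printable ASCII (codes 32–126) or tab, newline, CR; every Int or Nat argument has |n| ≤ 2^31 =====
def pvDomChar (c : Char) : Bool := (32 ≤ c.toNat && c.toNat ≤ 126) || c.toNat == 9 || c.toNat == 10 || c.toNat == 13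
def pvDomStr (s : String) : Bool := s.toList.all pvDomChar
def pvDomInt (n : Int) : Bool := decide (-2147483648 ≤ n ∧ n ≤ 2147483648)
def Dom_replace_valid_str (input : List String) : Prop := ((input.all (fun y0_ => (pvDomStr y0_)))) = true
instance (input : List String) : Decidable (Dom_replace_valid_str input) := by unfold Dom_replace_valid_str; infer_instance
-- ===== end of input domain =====

-- B replaces A's 13 repeated contains+replace full-string scans per title by a single
-- character-filter pass against a prebuilt forbidden-character set (objective: simpler).

-- ===== PORT A =====
def errorKey : List String := ["\\", "/", ":", "*", "?", "\"", "<", ">", "|", ".", "|", "？", "?"]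

def replace_valid_str (input : List String) : List String :=
  input.foldl (fun after_list title =>
    after_list ++ [errorKey.foldl
      (fun t e => if PySem.Str.isIn e t then PySem.Str.replace t e "" else t)
      (PySem.Str.strip title)]) []

-- ===== PORT B =====
def forbiddenChars : PySem.Set Char :=
  PySem.Set.ofList ['\\', '/', ':', '*', '?', '"', '<', '>', '|', '.', '？']

def replace_valid_str_alt (input : List String) : List String :=
  input.map (fun title =>
    String.ofList ((PySem.Str.strip title).toList.filter
      (fun ch => !(PySem.Set.contains forbiddenChars ch))))

-- ===== PRECONDITION & SPEC =====
def Spec_replace_valid_str (input : List String) (out : List String) : Prop := out = replace_valid_str_alt input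
instance (input : List String) (out : List String) : Decidable (Spec_replace_valid_str input out) := by unfold Spec_replace_valid_str; infer_instance

-- ===== CLAIM (what is proved, stated in full; the proofs are below) =====
def Claim_equal_replace_valid_str : Prop := ∀ (input : List String), Dom_replace_valid_str input → Spec_replace_valid_str input (replace_valid_str input)

-- ===== LEMMAS AND PROOFS =====

-- replace with a single-char needle and empty replacement is a character filter
theorem replace_go_single (e : Char) :
    ∀ (l : List Char) (fuel : Nat) (acc : List Char), l.length ≤ fuel →
      PySem.Chars.replace.go [e] [] fuel l acc = acc.reverse ++ l.filter (fun c => c != e) := by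
  intro l
  induction l with
  | nil =>
    intro fuel acc _
    cases fuel <;> simp [PySem.Chars.replace.go.eq_def]
  | cons c t ih =>
    intro fuel acc hle
    cases fuel with
    | zero => simp at hle
    | succ n =>
      rw [PySem.Chars.replace.go.eq_def]
      by_cases hc : c = e
      · subst hc
        have hpre : [c].isPrefixOf (c :: t) = true := by simp [List.isPrefixOf]
        simp only [hpre, if_true, List.length_cons, List.length_nil, Nat.zero_add,
          List.drop_succ_cons, List.drop_zero, List.reverse_nil, List.nil_append]
        rw [ih n acc (by simpa using hle)]
        simp
      · have hpre : [e].isPrefixOf (c :: t) = false := by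
          simp [List.isPrefixOf]
          exact fun h => absurd h.symm hc
        simp only [hpre, Bool.false_eq_true, if_false]
        rw [ih n (c :: acc) (by simpa using hle)]
        simp [hc]

theorem replace_single (l : List Char) (e : Char) :
    PySem.Chars.replace l [e] [] = l.filter (fun c => c != e) := by
  rw [PySem.Chars.replace]
  simp only [List.isEmpty_cons, Bool.false_eq_true, if_false]
  simpa using replace_go_single e l l.length [] le_rfl

-- 'e in t' for a single-char needle is list membership
theorem find_go_single (e : Char) :
    ∀ (t : List Char) (k : Nat), (PySem.Chars.find.go [e] t k != -1) = t.contains e := by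
  intro t
  induction t with
  | nil => intro k; simp [PySem.Chars.find.go]
  | cons c t ih =>
    intro k
    rw [PySem.Chars.find.go]
    by_cases hc : e = c
    · subst hc
      have hpre : [e].isPrefixOf (e :: t) = true := by simp [List.isPrefixOf]
      have hk : ((k : Int) != -1) = true := by
        simp only [bne_iff_ne, ne_eq]; omega
      simp [hpre, hk]
    · have hpre : [e].isPrefixOf (c :: t) = false := by
        simp [List.isPrefixOf]; exact fun h => absurd h hc
      have hce : (e == c) = false := by
        simp only [beq_eq_false_iff_ne, ne_eq]
        exact hc
      simp only [hpre, Bool.false_eq_true, if_false, ih, List.contains_cons, hce,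
        Bool.false_or]

theorem isIn_single (e : Char) (t : List Char) :
    PySem.Chars.isIn [e] t = t.contains e := by
  rw [PySem.Chars.isIn, PySem.Chars.find]
  exact find_go_single e t 0

-- one step of A's inner loop, on lists
theorem step_single (e : Char) (s : List Char) :
    (if PySem.Str.isIn (String.ofList [e]) (String.ofList s)
       then PySem.Str.replace (String.ofList s) (String.ofList [e]) ""
       else String.ofList s)
    = String.ofList (s.filter (fun c => c != e)) := by
  by_cases h : s.contains e
  · rw [if_pos]
    · rw [PySem.Str.replace]
      simp [replace_single]
    · rw [PySem.Str.isIn]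
      simp only [String.toList_ofList]
      show PySem.Chars.isIn [e] s = true
      rw [isIn_single, h]
  · rw [if_neg]
    · congr 1
      symm
      apply List.filter_eq_self.mpr
      intro c hc
      simp only [bne_iff_ne, ne_eq]
      intro hce
      subst hce
      exact absurd (List.contains_iff_mem.mpr hc) (by simpa using h)
    · rw [PySem.Str.isIn]
      simp only [String.toList_ofList]
      show ¬ PySem.Chars.isIn [e] s = true
      rw [isIn_single]
      simpa using h
  
-- A's whole inner loop over a list of single-char needles is one filter
theorem chain_filter (es : List Char) :
    ∀ (s : List Char),
      (es.map (fun c => String.ofList [c])).foldl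
        (fun t e => if PySem.Str.isIn e t then PySem.Str.replace t e "" else t)
        (String.ofList s)
      = String.ofList (s.filter (fun c => !(es.contains c))) := by
  induction es with
  | nil => intro s; simp
  | cons e es ih =>
    intro s
    simp only [List.map_cons, List.foldl_cons, step_single]
    rw [ih (s.filter (fun c => c != e)), List.filter_filter]
    congr 1
    apply List.filter_congr
    intro c _
    by_cases hc : c = e <;> simp [hc]

-- A's outer accumulator loop is a map
theorem foldl_append_map {α β : Type} (f : α → β) :
    ∀ (l : List α) (acc : List β),
      l.foldl (fun acc t => acc ++ [f t]) acc = acc ++ l.map f := by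
  intro l
  induction l with
  | nil => intro acc; simp
  | cons x l ih => intro acc; simp [ih]

theorem forbidden_eq (c : Char) :
    PySem.Set.contains forbiddenChars c
      = List.contains ['\\', '/', ':', '*', '?', '"', '<', '>', '|', '.', '|', '？', '?'] c := by
  have h : forbiddenChars = ['\\', '/', ':', '*', '?', '"', '<', '>', '|', '.', '？'] := by decide
  rw [h]
  show List.elem c _ = _
  rw [List.elem_eq_contains, List.contains_eq_mem, List.contains_eq_mem, decide_eq_decide]
  simp only [List.mem_cons, List.not_mem_nil, or_false]
  tauto

theorem errorKey_eq :
    errorKey = (['\\', '/', ':', '*', '?', '"', '<', '>', '|', '.', '|', '？', '?']).map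
      (fun c => String.ofList [c]) := by rfl

-- ===== VERDICT (by name: the statement is the Claim_ definition above) =====
theorem replace_valid_str_spec : Claim_equal_replace_valid_str := by
  intro input _
  unfold Spec_replace_valid_str replace_valid_str replace_valid_str_alt
  rw [errorKey_eq, foldl_append_map]
  simp only [List.nil_append]
  apply List.map_congr_left
  intro title _
  rw [show PySem.Str.strip title = String.ofList (PySem.Chars.strip title.toList) from rfl]
  rw [chain_filter]
  simp only [String.toList_ofList]
  congr 1
  apply List.filter_congr
  intro c _
  rw [forbidden_eq]
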